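-- pv_equiv track=rewrite | github.com/riehseun/riehseun.github.io | leet150/leet207.py | dfs
-- ===== SOURCE A (Python) =====
-- def dfs(start_node, directed_graph):
--     explored = {}
--     explored[start_node] = True
--
--     stack = []
--     stack.append(start_node)
--
--     is_cycle = False
--
--     while stack:
--         node = stack.pop()
--         if node in directed_graph:
--             for next_node in directed_graph[node]:
--                 if next_node not in explored:
--                     explored[next_node] = True
--                     stack.append(next_node)
--                 else:
--                     if next_node == start_node:
--                         is_cycle = True
--
--     return is_cycle
-- ===== SOURCE B (Python) =====
-- def dfs(start_node, directed_graph):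
--     # Phase 1: plain reachability traversal from start_node (no cycle checks).
--     reachable = {start_node}
--     frontier = [start_node]
--     while frontier:
--         u = frontier.pop()
--         for v in directed_graph.get(u, []):
--             if v not in reachable:
--                 reachable.add(v)
--                 frontier.append(v)
--     # Phase 2: scan the out-edges of the reachable nodes for one back to start_node.
--     return any(start_node in directed_graph.get(u, []) for u in reachable)
-- ===== Notes on version B (the rewrite author's own statement) =====
-- stated objective: alternative
-- what changed: A's single DFS loop that checks for back-edges to start_node while it traverses is split into two distinct passes: a plain reachability traversal that only builds the reachable set, followed by a separate scan of the reachable nodes' adjacency lists for an edge back to start_node.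
import Mathlib
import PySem

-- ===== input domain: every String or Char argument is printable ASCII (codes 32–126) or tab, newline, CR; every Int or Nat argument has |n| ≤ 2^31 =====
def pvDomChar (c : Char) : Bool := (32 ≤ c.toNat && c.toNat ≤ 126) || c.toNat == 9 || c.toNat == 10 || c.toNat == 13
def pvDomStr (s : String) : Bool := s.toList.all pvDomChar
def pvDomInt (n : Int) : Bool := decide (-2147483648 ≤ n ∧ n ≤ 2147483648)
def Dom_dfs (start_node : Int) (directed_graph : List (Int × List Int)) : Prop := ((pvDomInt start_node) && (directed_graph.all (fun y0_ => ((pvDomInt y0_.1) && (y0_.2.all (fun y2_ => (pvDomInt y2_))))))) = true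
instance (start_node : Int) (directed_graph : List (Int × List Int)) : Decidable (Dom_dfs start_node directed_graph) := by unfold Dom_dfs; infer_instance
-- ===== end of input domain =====

-- B restructures A's single traverse-and-check DFS loop into two separate passes: a plain
-- reachability traversal, then a scan of the reachable nodes' out-edges for one back to
-- start_node (objective: alternative decomposition, same asymptotic cost).

-- ===== PORT A =====
-- fuel bound for the Python `while stack` loop (each pop consumes one unit; pops are
-- bounded by 1 + total adjacency length); sufficiency is proved below, so the guard
-- only makes the same computation total.
def dfsFuel (directed_graph : List (Int × List Int)) : Nat :=
  2 + (directed_graph.map (fun p => p.2.length)).sum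

-- body of A's `for next_node in directed_graph[node]` loop; state = (explored, stack, is_cycle)
def dfsStepA (start_node : Int)
    (s : PySem.Dict Int Bool × List Int × Bool) (v : Int) :
    PySem.Dict Int Bool × List Int × Bool :=
  if s.1.contains v = false then
    (s.1.insert v true, v :: s.2.1, s.2.2)
  else
    (s.1, s.2.1, s.2.2 || (v == start_node))

-- A's `while stack` loop (stack top = list head)
def dfsLoopA (start_node : Int) (directed_graph : List (Int × List Int)) :
    Nat → PySem.Dict Int Bool → List Int → Bool → Bool
  | 0, _, _, is_cycle => is_cycle
  | _ + 1, _, [], is_cycle => is_cycle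
  | n + 1, explored, node :: rest, is_cycle =>
    match directed_graph.lookup node with
    | none => dfsLoopA start_node directed_graph n explored rest is_cycle
    | some adj =>
      let s := adj.foldl (dfsStepA start_node) (explored, rest, is_cycle)
      dfsLoopA start_node directed_graph n s.1 s.2.1 s.2.2

def dfs (start_node : Int) (directed_graph : List (Int × List Int)) : Bool :=
  dfsLoopA start_node directed_graph (dfsFuel directed_graph)
    (PySem.Dict.empty.insert start_node true) [start_node] false

-- ===== PORT B =====
-- body of B's phase-1 inner loop; state = (reachable, frontier); no cycle check here
def dfsStepB (s : PySem.Set Int × List Int) (v : Int) : PySem.Set Int × List Int :=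
  if PySem.Set.contains s.1 v = false then (PySem.Set.add s.1 v, v :: s.2) else s

-- B's phase 1: plain reachability (`while frontier`), returns the reachable set
def reachLoopB (directed_graph : List (Int × List Int)) :
    Nat → PySem.Set Int → List Int → PySem.Set Int
  | 0, reachable, _ => reachable
  | _ + 1, reachable, [] => reachable
  | n + 1, reachable, u :: rest =>
    let s := ((directed_graph.lookup u).getD []).foldl dfsStepB (reachable, rest)
    reachLoopB directed_graph n s.1 s.2

def dfs_alt (start_node : Int) (directed_graph : List (Int × List Int)) : Bool :=
  let reachable := reachLoopB directed_graph (dfsFuel directed_graph)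
    (PySem.Set.ofList [start_node]) [start_node]
  -- phase 2: any(start_node in directed_graph.get(u, []) for u in reachable)
  reachable.any (fun u => ((directed_graph.lookup u).getD []).contains start_node)

-- ===== PRECONDITION & SPEC =====
def Spec_dfs (start_node : Int) (directed_graph : List (Int × List Int)) (out : Bool) : Prop := out = dfs_alt start_node directed_graph
instance (start_node : Int) (directed_graph : List (Int × List Int)) (out : Bool) : Decidable (Spec_dfs start_node directed_graph out) := by unfold Spec_dfs; infer_instance

-- ===== CLAIM (what is proved, stated in full; the proofs are below) =====
def Claim_equal_dfs : Prop := ∀ (start_node : Int) (directed_graph : List (Int × List Int)), Dom_dfs start_node directed_graph → Spec_dfs start_node directed_graph (dfs start_node directed_graph)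

-- ===== LEMMAS AND PROOFS =====

-- "has an edge back to start": the predicate scanned in B's phase 2
def pvP (start_node : Int) (directed_graph : List (Int × List Int)) (u : Int) : Bool :=
  ((directed_graph.lookup u).getD []).contains start_node

-- the fresh nodes appended when processing adjacency list `adj` against visited set `R`
def pvNew (adj R : List Int) : List Int :=
  match adj with
  | [] => []
  | v :: tl => if v ∈ R then pvNew tl R else v :: pvNew tl (R ++ [v])

-- A's explored dict is the visited list tagged `true`
def pvDictOf (R : List Int) : PySem.Dict Int Bool :=
  PySem.Dict.mk (R.map (fun k => (k, true)))

def pvVals (directed_graph : List (Int × List Int)) : List Int :=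
  (directed_graph.map (fun p => p.2)).flatten

-- termination measure for both loops
def pvMu (directed_graph : List (Int × List Int)) (R stack : List Int) : Nat :=
  stack.length + ((pvVals directed_graph).dedup.filter (fun x => x ∉ R)).length

lemma pvDictOf_contains (R : List Int) (v : Int) :
    (pvDictOf R).contains v = decide (v ∈ R) := by
  induction R with
  | nil => rfl
  | cons a t ih =>
    rw [PySem.Dict.contains_eq_isSome_get?] at ih ⊢
    simp only [pvDictOf, List.map_cons, PySem.Dict.get?_mk_cons] at ih ⊢
    by_cases h : a = v
    · simp [h]
    · have hb : (a == v) = false := by simpa using h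
      have h' : v ≠ a := fun hh => h hh.symm
      simp [hb, ih, h']

lemma pvDictOf_insert (R : List Int) (v : Int) (h : v ∉ R) :
    (pvDictOf R).insert v true = pvDictOf (R ++ [v]) := by
  apply PySem.Dict.ext
  rw [PySem.Dict.items_insert_of_not_contains _ true (by simp [pvDictOf_contains, h])]
  simp [pvDictOf]

lemma pvNew_sub (adj : List Int) : ∀ R x, x ∈ pvNew adj R → x ∈ adj := by
  induction adj with
  | nil => intro R x hx; simp [pvNew] at hx
  | cons v tl ih =>
    intro R x hx
    simp only [pvNew] at hx
    by_cases h : v ∈ R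
    · simp only [if_pos h] at hx
      exact List.mem_cons_of_mem _ (ih R x hx)
    · simp only [if_neg h, List.mem_cons] at hx
      rcases hx with rfl | hx
      · exact List.mem_cons_self
      · exact List.mem_cons_of_mem _ (ih _ x hx)

lemma pvNew_disjoint (adj : List Int) : ∀ R, ∀ x ∈ pvNew adj R, x ∉ R := by
  induction adj with
  | nil => intro R x hx; simp [pvNew] at hx
  | cons v tl ih =>
    intro R x hx
    simp only [pvNew] at hx
    by_cases hv : v ∈ R
    · rw [if_pos hv] at hx; exact ih R x hx
    · rw [if_neg hv] at hx
      rcases List.mem_cons.mp hx with rfl | hx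
      · exact hv
      · intro hxR
        exact ih (R ++ [v]) x hx (by simp [hxR])

lemma pvNew_nodup_append (adj : List Int) : ∀ R : List Int, R.Nodup → (R ++ pvNew adj R).Nodup := by
  induction adj with
  | nil => intro R h; simpa [pvNew]
  | cons v tl ih =>
    intro R h
    simp only [pvNew]
    by_cases hv : v ∈ R
    · simpa [hv] using ih R h
    · have h' : (R ++ [v]).Nodup := by
        rw [List.nodup_append]
        refine ⟨h, List.nodup_singleton v, ?_⟩
        intro a ha b hb
        rw [List.mem_singleton] at hb
        subst hb
        exact fun heq => hv (heq ▸ ha)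
      have := ih (R ++ [v]) h'
      simpa [hv, List.append_assoc] using this

-- B's inner fold appends exactly the fresh nodes and pushes them (reversed) on the frontier
lemma foldB_eq (adj : List Int) : ∀ (R st : List Int),
    adj.foldl dfsStepB (R, st) = (R ++ pvNew adj R, (pvNew adj R).reverse ++ st) := by
  induction adj with
  | nil => intro R st; simp [pvNew]
  | cons v tl ih =>
    intro R st
    simp only [List.foldl_cons, pvNew]
    by_cases hv : v ∈ R
    · have hc : PySem.Set.contains R v = true := by
        simp [PySem.Set.contains, hv]
      simp [dfsStepB, if_pos hv, ih]
    · have hc : PySem.Set.contains R v = false := by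
        simp [PySem.Set.contains]
        exact hv
      have hadd : PySem.Set.add R v = R ++ [v] := by
        simp only [PySem.Set.add, hc]
        rfl
      simp [dfsStepB, ih (R ++ [v]) (v :: st), List.append_assoc, hv]

-- A's inner fold does the same to explored/stack and ORs in "adj contains start_node"
lemma foldA_eq (start_node : Int) (adj : List Int) :
    ∀ (R st : List Int) (isc : Bool), start_node ∈ R →
    adj.foldl (dfsStepA start_node) (pvDictOf R, st, isc)
      = (pvDictOf (R ++ pvNew adj R), (pvNew adj R).reverse ++ st,
          isc || adj.contains start_node) := by
  induction adj with
  | nil => intro R st isc _; simp [pvNew]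
  | cons v tl ih =>
    intro R st isc hs
    simp only [List.foldl_cons, pvNew]
    by_cases hv : v ∈ R
    · have hstep : dfsStepA start_node (pvDictOf R, st, isc) v
          = (pvDictOf R, st, isc || (v == start_node)) := by
        simp [dfsStepA, pvDictOf_contains, hv]
      rw [if_pos hv, hstep, ih R st _ hs]
      have hcomm : (start_node == v) = (v == start_node) := by simp [eq_comm]
      simp only [Prod.mk.injEq, List.contains_cons, true_and]
      cases isc <;> simp [hcomm]
    · have hne : (start_node == v) = false := by
        simp only [beq_eq_false_iff_ne, ne_eq]
        rintro rfl; exact hv hs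
      have hstep : dfsStepA start_node (pvDictOf R, st, isc) v
          = (pvDictOf (R ++ [v]), v :: st, isc) := by
        simp [dfsStepA, pvDictOf_contains, hv, pvDictOf_insert R v hv]
      rw [if_neg hv, hstep, ih (R ++ [v]) (v :: st) isc (by simp [hs])]
      have hne' : decide (start_node = v) = false := by simpa using hne
      simp [hne', List.append_assoc]

-- reachLoopB only appends to the reachable set
lemma reachLoopB_prefix (g : List (Int × List Int)) :
    ∀ (n : Nat) (R st : List Int), ∃ t, reachLoopB g n R st = R ++ t := by
  intro n
  induction n with
  | zero => intro R st; exact ⟨[], by simp only [List.append_nil]; rfl⟩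
  | succ n ih =>
    intro R st
    cases st with
    | nil => exact ⟨[], by simp only [List.append_nil]; rfl⟩
    | cons u rest =>
      simp only [reachLoopB, foldB_eq]
      obtain ⟨t, ht⟩ := ih (R ++ pvNew ((g.lookup u).getD []) R)
        ((pvNew ((g.lookup u).getD []) R).reverse ++ rest)
      exact ⟨pvNew ((g.lookup u).getD []) R ++ t, by simp [ht]⟩

lemma lookup_mem_vals (g : List (Int × List Int)) (node : Int) (adj : List Int)
    (h : g.lookup node = some adj) : ∀ x ∈ adj, x ∈ pvVals g := by
  induction g with
  | nil => simp [List.lookup] at h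
  | cons p t ih =>
    intro x hx
    rw [List.lookup] at h
    have hmem : x ∈ p.2 ∨ x ∈ pvVals t := by
      split at h
      · cases h; exact Or.inl hx
      · exact Or.inr (ih h x hx)
    simp only [pvVals, List.map_cons, List.flatten_cons, List.mem_append]
    simpa [pvVals] using hmem

-- processing one node strictly decreases the measure
lemma pvMu_step (g : List (Int × List Int)) (R : List Int) (node : Int) (rest : List Int)
    (adj : List Int) (h : g.lookup node = some adj) (hR : R.Nodup) :
    pvMu g (R ++ pvNew adj R) ((pvNew adj R).reverse ++ rest) + 1 ≤ pvMu g R (node :: rest) := by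
  have hnodup : (R ++ pvNew adj R).Nodup := pvNew_nodup_append adj R hR
  have hnn : (pvNew adj R).Nodup := (List.nodup_append.mp hnodup).2.1
  have key : ((pvVals g).dedup.filter (fun x => x ∉ R ++ pvNew adj R)).length + (pvNew adj R).length
      ≤ ((pvVals g).dedup.filter (fun x => x ∉ R)).length := by
    have htot := List.length_eq_length_filter_add
      (l := (pvVals g).dedup.filter (fun x => x ∉ R)) (fun x => decide (x ∈ pvNew adj R))
    have hsub : pvNew adj R ⊆ ((pvVals g).dedup.filter (fun x => x ∉ R)).filter
        (fun x => decide (x ∈ pvNew adj R)) := by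
      intro x hx
      simp only [List.mem_filter, List.mem_dedup, decide_eq_true_eq]
      exact ⟨⟨lookup_mem_vals g node adj h x (pvNew_sub adj R x hx),
        by simpa using pvNew_disjoint adj R x hx⟩, hx⟩
    have hlen := (hnn.subperm hsub).length_le
    have heq : ((pvVals g).dedup.filter (fun x => x ∉ R)).filter
          (fun x => !decide (x ∈ pvNew adj R))
        = (pvVals g).dedup.filter (fun x => x ∉ R ++ pvNew adj R) := by
      rw [List.filter_filter]
      apply List.filter_congr
      intro x _
      simp [List.mem_append, not_or, Bool.and_comm]
    rw [heq] at htot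
    omega
  simp only [pvMu, List.length_append, List.length_reverse, List.length_cons]
  omega

-- MAIN: A's loop equals "flag so far || edge-to-start from something still to be popped",
-- where the still-to-be-popped nodes are the current stack plus whatever B's reachability
-- loop appends beyond the current visited set R.
lemma pvMain (start_node : Int) (g : List (Int × List Int)) :
    ∀ (fuel : Nat) (R stack : List Int) (isc : Bool),
    start_node ∈ R → R.Nodup → pvMu g R stack < fuel →
    dfsLoopA start_node g fuel (pvDictOf R) stack isc
      = (isc || stack.any (pvP start_node g)
          || ((reachLoopB g fuel R stack).drop R.length).any (pvP start_node g)) := by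
  intro fuel
  induction fuel with
  | zero => intro R stack isc _ _ hmu; omega
  | succ n ih =>
    intro R stack isc hs hR hmu
    cases stack with
    | nil =>
      simp [dfsLoopA, reachLoopB]
    | cons node rest =>
      cases hlu : g.lookup node with
      | none =>
        have hmu' : pvMu g R rest < n := by
          simp only [pvMu, List.length_cons] at hmu ⊢; omega
        have := ih R rest isc hs hR hmu'
        simp only [dfsLoopA, hlu, this, reachLoopB, Option.getD_none, List.foldl_nil]
        have hp : pvP start_node g node = false := by
          simp [pvP, hlu]
        simp [hp]
      | some adj =>
        have hfold := foldA_eq start_node adj R rest isc hs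
        have hmu' : pvMu g (R ++ pvNew adj R) ((pvNew adj R).reverse ++ rest) < n := by
          have := pvMu_step g R node rest adj hlu hR
          omega
        have hs' : start_node ∈ R ++ pvNew adj R := by simp [hs]
        have hR' : (R ++ pvNew adj R).Nodup := pvNew_nodup_append adj R hR
        have := ih (R ++ pvNew adj R) ((pvNew adj R).reverse ++ rest)
          (isc || adj.contains start_node) hs' hR' hmu'
        simp only [dfsLoopA, hlu, hfold, this, reachLoopB, Option.getD_some, foldB_eq]
        obtain ⟨t, ht⟩ := reachLoopB_prefix g n (R ++ pvNew adj R)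
          ((pvNew adj R).reverse ++ rest)
        rw [ht]
        have hd1 : ((R ++ pvNew adj R) ++ t).drop (R ++ pvNew adj R).length = t :=
          List.drop_left
        have hd2 : ((R ++ pvNew adj R) ++ t).drop R.length = pvNew adj R ++ t := by
          rw [List.append_assoc]; exact List.drop_left
        rw [hd1, hd2]
        have hp : pvP start_node g node = adj.contains start_node := by
          simp [pvP, hlu]
        simp only [List.any_append, List.any_reverse, List.any_cons, hp]
        generalize adj.contains start_node = b1 at *
        generalize rest.any (pvP start_node g) = b2
        generalize (pvNew adj R).any (pvP start_node g) = b3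
        generalize t.any (pvP start_node g) = b4
        cases isc <;> cases b1 <;> cases b2 <;> cases b3 <;> cases b4 <;> rfl

lemma pvInit_dict (s : Int) : PySem.Dict.empty.insert s true = pvDictOf [s] := by
  apply PySem.Dict.ext
  rw [PySem.Dict.items_insert_of_not_contains _ true (by simp)]
  simp [pvDictOf, PySem.Dict.empty]

lemma pvMu_init (g : List (Int × List Int)) (s : Int) :
    pvMu g [s] [s] < dfsFuel g := by
  have h1 : ((pvVals g).dedup.filter (fun x => x ∉ [s])).length ≤ (pvVals g).length :=
    le_trans (List.length_filter_le _ _) (List.Sublist.length_le (List.dedup_sublist _))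
  have h2 : (pvVals g).length = (g.map (fun p => p.2.length)).sum := by
    simp [pvVals, List.length_flatten, Function.comp_def]
  simp only [pvMu, List.length_cons, List.length_nil, dfsFuel]
  omega

-- ===== VERDICT (by name: the statement is the Claim_ definition above) =====
theorem dfs_spec : Claim_equal_dfs := by
  intro start_node g _
  show dfs start_node g = dfs_alt start_node g
  have hmain := pvMain start_node g (dfsFuel g) [start_node] [start_node] false
    (by simp) (by simp) (pvMu_init g start_node)
  rw [dfs, pvInit_dict, hmain]
  obtain ⟨t, ht⟩ := reachLoopB_prefix g (dfsFuel g) [start_node] [start_node]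
  have hof : PySem.Set.ofList [start_node] = [start_node] := rfl
  have hP : (fun u => ((g.lookup u).getD []).contains start_node) = pvP start_node g := by
    funext u; rfl
  rw [dfs_alt, hof, ht, hP]
  simp
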